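-- pv_equiv track=rewrite | github.com/MoonGyu1/AlgorithmStudy | GimmeSpoon/b03_math/bj_1747.py | every_palindrome
-- ===== SOURCE A (Python) =====
-- def every_palindrome(digit):
--
--     palindromes = [0]
--
--     for d in range((digit - 1) % 2, digit, 2):
--         new_palindromes = []
--
--         for v in range(10):
--             for p in palindromes:
--                 if d == 0:
--                     new_palindromes.append(p * 10 + (10 ** d) * v)
--                 else:
--                     new_palindromes.append(p * 10 + (10 ** d) * v + v)
--
--         palindromes = new_palindromes
--
--     return palindromes
-- ===== SOURCE B (Python) =====
-- def every_palindrome(digit):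
--     if digit < 1:
--         return [0]
--     half = (digit + 1) // 2
--     m = digit // 2
--
--     def mirror(h):
--         t = h if digit % 2 == 0 else h // 10
--         r = 0
--         for _ in range(m):
--             r = r * 10 + t % 10
--             t //= 10
--         return h * 10 ** m + r
--
--     return [mirror(h) for h in range(10 ** half)]
-- ===== Notes on version B (the rewrite author's own statement) =====
-- stated objective: alternative
-- what changed: A rebuilds the whole palindrome list layer by layer (one pass per digit pair, each pass 10x the list); B computes each palindrome directly in one pass over the first halves, mirroring the half numerically (no layered rebuilding).
import Mathlib
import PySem

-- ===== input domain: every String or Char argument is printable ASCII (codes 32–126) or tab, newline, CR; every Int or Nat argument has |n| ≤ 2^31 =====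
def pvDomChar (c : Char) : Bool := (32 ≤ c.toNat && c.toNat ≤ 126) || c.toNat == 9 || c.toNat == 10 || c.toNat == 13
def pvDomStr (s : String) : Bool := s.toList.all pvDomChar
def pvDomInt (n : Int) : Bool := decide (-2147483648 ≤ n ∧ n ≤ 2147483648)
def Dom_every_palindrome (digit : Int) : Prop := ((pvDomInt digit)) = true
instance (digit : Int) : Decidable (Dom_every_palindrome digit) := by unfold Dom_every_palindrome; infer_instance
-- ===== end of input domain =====

-- B builds each palindrome directly from its first half in a single pass instead of A's
-- layered list rebuilding; same cost class, alternative algorithm (not claimed faster).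

-- ===== PORT A =====
-- every d produced by range((digit-1)%2, digit, 2) is ≥ 0, so 10 ** d = 10 ^ d.toNat exactly
def every_palindrome (digit : Int) : List Int :=
  (PySem.List.pyRange (PySem.Int.mod (digit - 1) 2) digit 2).foldl
    (fun palindromes d =>
      (PySem.List.pyRange 0 10 1).foldl
        (fun acc v =>
          palindromes.foldl
            (fun acc p =>
              if d == 0 then acc ++ [p * 10 + 10 ^ d.toNat * v]
              else acc ++ [p * 10 + 10 ^ d.toNat * v + v])
            acc)
        [])
    [0]

-- ===== PORT B =====
-- port of Source B's inner helper `mirror` (digit and m are its closure variables);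
-- m ≥ 0 whenever called, so 10 ** m = 10 ^ m.toNat exactly
def pvMirror (digit m h : Int) : Int :=
  let t : Int := if PySem.Int.mod digit 2 == 0 then h else PySem.Int.floordiv h 10
  let rt := (PySem.List.pyRange 0 m 1).foldl
      (fun (rt : Int × Int) _ => (rt.1 * 10 + PySem.Int.mod rt.2 10, PySem.Int.floordiv rt.2 10))
      (0, t)
  h * 10 ^ m.toNat + rt.1

-- half ≥ 1 here, so 10 ** half = 10 ^ half.toNat exactly
def every_palindrome_alt (digit : Int) : List Int :=
  if digit < 1 then [0]
  else
    let half := PySem.Int.floordiv (digit + 1) 2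
    let m := PySem.Int.floordiv digit 2
    (PySem.List.pyRange 0 (10 ^ half.toNat) 1).map (pvMirror digit m)

-- ===== PRECONDITION & SPEC =====
def Spec_every_palindrome (digit : Int) (out : List Int) : Prop := out = every_palindrome_alt digit
instance (digit : Int) (out : List Int) : Decidable (Spec_every_palindrome digit out) := by unfold Spec_every_palindrome; infer_instance

-- ===== CLAIM (what is proved, stated in full; the proofs are below) =====
def Claim_equal_every_palindrome : Prop := ∀ (digit : Int), Dom_every_palindrome digit → Spec_every_palindrome digit (every_palindrome digit)

-- ===== LEMMAS AND PROOFS =====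

def pvStep (d : Int) (ps : List Int) : List Int :=
  (PySem.List.pyRange 0 10 1).foldl
    (fun acc v =>
      ps.foldl
        (fun acc p =>
          if d == 0 then acc ++ [p * 10 + 10 ^ d.toNat * v]
          else acc ++ [p * 10 + 10 ^ d.toNat * v + v])
        acc)
    []
def pvC (d : Nat) : Nat := if d = 0 then 1 else 10 ^ d + 1
def pvF (s : Nat) : Nat → Nat → Nat
  | 0, _ => 0
  | n + 1, j => pvF s n (j % 10 ^ n) * 10 + pvC (s + 2 * n) * (j / 10 ^ n)
theorem pv_flatMap_range {α : Type} (a L : Nat) (g : Nat → Nat → α) :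
    (List.range a).flatMap (fun v => (List.range L).map (fun p => g v p))
      = (List.range (a * L)).map (fun j => g (j / L) (j % L)) := by
  rcases Nat.eq_zero_or_pos L with hL | hL
  · subst hL; simp
  induction a with
  | zero => simp
  | succ a ih =>
    rw [List.range_succ, List.flatMap_append, ih, Nat.succ_mul, List.range_add, List.map_append]
    congr 1
    simp only [List.flatMap_cons, List.flatMap_nil, List.append_nil, List.map_map]
    apply List.map_congr_left
    intro p hp
    have hpL : p < L := List.mem_range.mp hp
    have hdiv : (a * L + p) / L = a := by
      rw [Nat.mul_comm, Nat.mul_add_div hL, Nat.div_eq_of_lt hpL, Nat.add_zero]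
    simp [hdiv, Nat.mod_eq_of_lt hpL]

theorem pvStep_map (d : Int) (f : Nat → Int) (L : Nat) :
    pvStep d ((List.range L).map f)
      = (List.range (10 * L)).map
          (fun j => f (j % L) * 10 + (if d = 0 then 1 else 10 ^ d.toNat + 1) * ((j / L : Nat) : Int)) := by
  have hrng : PySem.List.pyRange 0 10 1 = (List.range 10).map (fun (k : Nat) => (Int.ofNat k)) := by decide
  have hbody : ∀ (v : Int),
      (fun (acc : List Int) (p : Int) =>
        if d == 0 then acc ++ [p * 10 + 10 ^ d.toNat * v]
        else acc ++ [p * 10 + 10 ^ d.toNat * v + v])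
      = (fun acc p => acc ++ [p * 10 + (if d = 0 then 1 else 10 ^ d.toNat + 1) * v]) := by
    intro v
    funext acc p
    by_cases h : d = 0
    · simp [h]
    · simp [h]; ring_nf
  unfold pvStep
  rw [hrng]
  simp only [hbody]
  simp only [PySem.List.foldl_append_singleton_eq_map]
  rw [show (fun (acc : List Int) (v : Int) => acc ++ ((List.range L).map f).map
        (fun p => p * 10 + (if d = 0 then 1 else 10 ^ d.toNat + 1) * v))
      = (fun acc v => acc ++ ((List.range L).map
        (fun p => f p * 10 + (if d = 0 then 1 else 10 ^ d.toNat + 1) * v)) ) from by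
      funext acc v; rw [List.map_map]; rfl]
  rw [PySem.List.foldl_append_eq_flatMap]
  simp only [List.flatMap_map]
  rw [pv_flatMap_range 10 L (fun v p => f p * 10 + (if d = 0 then 1 else 10 ^ d.toNat + 1) * (Int.ofNat v))]
  rfl

theorem pvC_cast (s n : Nat) (d : Int) (hd : d = (s : Int) + 2 * (n : Int)) :
    (if d = 0 then (1:Int) else 10 ^ d.toNat + 1) = ((pvC (s + 2 * n) : Nat) : Int) := by
  have htn : d.toNat = s + 2 * n := by omega
  by_cases h : s + 2 * n = 0
  · have : d = 0 := by omega
    simp [this, pvC, h]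
  · have hd0 : ¬ d = 0 := by omega
    rw [if_neg hd0, pvC, if_neg h, htn]
    push_cast
    ring

theorem pvA_char (s n : Nat) :
    (((List.range n).map (fun (k : Nat) => ((s : Int) + 2 * (Int.ofNat k)))).foldl
        (fun ps d => pvStep d ps) [0])
      = (List.range (10 ^ n)).map (fun j => ((pvF s n j : Nat) : Int)) := by
  induction n with
  | zero => simp [pvF]
  | succ n ih =>
    rw [List.range_succ, List.map_append, List.foldl_append, ih]
    simp only [List.map_cons, List.map_nil, List.foldl_cons, List.foldl_nil]
    rw [pvStep_map ((s : Int) + 2 * Int.ofNat n) (fun j => ((pvF s n j : Nat) : Int)) (10 ^ n)]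
    rw [pvC_cast s n ((s : Int) + 2 * Int.ofNat n) rfl]
    rw [show 10 * 10 ^ n = 10 ^ (n + 1) from (pow_succ' 10 n).symm]
    apply List.map_congr_left
    intro j hj
    show ((pvF s n (j % 10 ^ n) : Nat) : Int) * 10 + _ * ((j / 10 ^ n : Nat) : Int) = _
    rw [show pvF s (n+1) j = pvF s n (j % 10 ^ n) * 10 + pvC (s + 2 * n) * (j / 10 ^ n) from rfl]
    push_cast
    ring

def pvRev : Nat → Nat → Nat
  | 0, _ => 0
  | n + 1, t => pvRev n t * 10 + t / 10 ^ n % 10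

theorem pv_fmod_cast (m n : Nat) : PySem.Int.mod (m : Int) (n : Int) = ((m % n : Nat) : Int) := by
  show Int.fmod _ _ = _
  simp [Int.fmod_eq_emod]

theorem pv_fdiv_cast (m n : Nat) : PySem.Int.floordiv (m : Int) (n : Int) = ((m / n : Nat) : Int) := by
  show Int.fdiv _ _ = _
  simp [Int.fdiv_eq_ediv]

theorem pvRev_fold (n t : Nat) (l : List Int) (hl : l.length = n) :
    l.foldl
        (fun (rt : Int × Int) _ => (rt.1 * 10 + PySem.Int.mod rt.2 10, PySem.Int.floordiv rt.2 10))
        (0, (t : Int))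
      = (((pvRev n t : Nat) : Int), ((t / 10 ^ n : Nat) : Int)) := by
  induction n generalizing l with
  | zero =>
    rw [List.length_eq_zero_iff.mp hl]
    simp [pvRev]
  | succ n ih =>
    obtain ⟨l', x, rfl⟩ : ∃ l' x, l = l' ++ [x] := by
      rcases List.eq_nil_or_concat l with h | ⟨l', x, h⟩
      · subst h; simp at hl
      · exact ⟨l', x, by simpa using h⟩
    rw [List.foldl_append, ih l' (by simp at hl; omega)]
    simp only [List.foldl_cons, List.foldl_nil]
    rw [show ((10:Int)) = ((10:Nat) : Int) from rfl, pv_fmod_cast, pv_fdiv_cast]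
    refine Prod.ext ?_ ?_
    · show ((pvRev n t : Nat) : Int) * 10 + _ = _
      rw [show pvRev (n+1) t = pvRev n t * 10 + t / 10 ^ n % 10 from rfl]
      push_cast
      ring
    · show (((t / 10 ^ n / 10 : Nat) : Nat) : Int) = _
      rw [Nat.div_div_eq_div_mul, ← pow_succ]

theorem pvRev_add (n : Nat) : ∀ a b : Nat, pvRev n (a + b * 10 ^ n) = pvRev n a := by
  induction n with
  | zero => intro a b; rfl
  | succ n ih =>
    intro a b
    rw [show pvRev (n+1) (a + b * 10 ^ (n+1)) = pvRev n (a + b * 10 ^ (n+1)) * 10 + (a + b * 10 ^ (n+1)) / 10 ^ n % 10 from rfl]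
    rw [show pvRev (n+1) a = pvRev n a * 10 + a / 10 ^ n % 10 from rfl]
    have h1 : a + b * 10 ^ (n+1) = a + (b * 10) * 10 ^ n := by ring
    rw [h1, ih a (b * 10)]
    congr 1
    rw [Nat.add_mul_div_right _ _ (Nat.pos_of_ne_zero (by positivity)), Nat.add_mul_mod_self_right]

theorem pv_even_bridge (n : Nat) : ∀ j < 10 ^ n, pvF 1 n j = j * 10 ^ n + pvRev n j := by
  induction n with
  | zero =>
    intro j hj
    interval_cases j
    rfl
  | succ n ih =>
    intro j hj
    have hpos : 0 < 10 ^ n := Nat.pos_of_ne_zero (by positivity)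
    obtain ⟨r, q, hr, hq, rfl⟩ : ∃ r q, r < 10 ^ n ∧ q < 10 ∧ j = r + q * 10 ^ n := by
      refine ⟨j % 10 ^ n, j / 10 ^ n, Nat.mod_lt _ hpos, ?_, (Nat.mod_add_div' j (10 ^ n)).symm⟩
      rw [Nat.div_lt_iff_lt_mul hpos]
      calc j < 10 ^ (n+1) := hj
        _ = 10 * 10 ^ n := by ring
    have e1 : (r + q * 10 ^ n) % 10 ^ n = r := by
      rw [Nat.add_mul_mod_self_right, Nat.mod_eq_of_lt hr]
    have e2 : (r + q * 10 ^ n) / 10 ^ n = q := by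
      rw [Nat.add_mul_div_right _ _ hpos, Nat.div_eq_of_lt hr, Nat.zero_add]
    rw [show pvF 1 (n+1) (r + q * 10 ^ n) = pvF 1 n ((r + q * 10 ^ n) % 10 ^ n) * 10 + pvC (1 + 2 * n) * ((r + q * 10 ^ n) / 10 ^ n) from rfl]
    rw [show pvRev (n+1) (r + q * 10 ^ n) = pvRev n (r + q * 10 ^ n) * 10 + (r + q * 10 ^ n) / 10 ^ n % 10 from rfl]
    rw [e1, e2, ih r hr, pvRev_add n r q, Nat.mod_eq_of_lt hq]
    rw [show pvC (1 + 2 * n) = 10 ^ (1 + 2 * n) + 1 from by simp [pvC]]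
    rw [show (10:Nat) ^ (1 + 2 * n) = 10 * (10 ^ n * 10 ^ n) from by rw [pow_add, two_mul, pow_add]; ring]
    rw [pow_succ]
    ring

theorem pv_odd_bridge (n : Nat) : ∀ j < 10 ^ (n + 1), pvF 0 (n + 1) j = j * 10 ^ n + pvRev n (j / 10) := by
  induction n with
  | zero =>
    intro j hj
    simp [pvF, pvC, pvRev]
  | succ n ih =>
    intro j hj
    have hpos : 0 < 10 ^ (n + 1) := Nat.pos_of_ne_zero (by positivity)
    obtain ⟨r, q, hr, hq, rfl⟩ : ∃ r q, r < 10 ^ (n + 1) ∧ q < 10 ∧ j = r + q * 10 ^ (n + 1) := by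
      refine ⟨j % 10 ^ (n + 1), j / 10 ^ (n + 1), Nat.mod_lt _ hpos, ?_, (Nat.mod_add_div' j (10 ^ (n + 1))).symm⟩
      rw [Nat.div_lt_iff_lt_mul hpos]
      calc j < 10 ^ (n + 2) := hj
        _ = 10 * 10 ^ (n + 1) := by ring
    have e1 : (r + q * 10 ^ (n + 1)) % 10 ^ (n + 1) = r := by
      rw [Nat.add_mul_mod_self_right, Nat.mod_eq_of_lt hr]
    have e2 : (r + q * 10 ^ (n + 1)) / 10 ^ (n + 1) = q := by
      rw [Nat.add_mul_div_right _ _ hpos, Nat.div_eq_of_lt hr, Nat.zero_add]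
    have e3 : (r + q * 10 ^ (n + 1)) / 10 = r / 10 + q * 10 ^ n := by
      rw [show q * 10 ^ (n + 1) = (q * 10 ^ n) * 10 from by rw [pow_succ]; ring]
      rw [Nat.add_mul_div_right _ _ (by norm_num : (0:Nat) < 10)]
    have hr10 : r / 10 < 10 ^ n := by
      rw [Nat.div_lt_iff_lt_mul (by norm_num : (0:Nat) < 10)]
      calc r < 10 ^ (n + 1) := hr
        _ = 10 ^ n * 10 := by rw [pow_succ]
    have e4 : (r / 10 + q * 10 ^ n) / 10 ^ n = q := by
      rw [Nat.add_mul_div_right _ _ (Nat.pos_of_ne_zero (by positivity)), Nat.div_eq_of_lt hr10, Nat.zero_add]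
    rw [show pvF 0 (n + 2) (r + q * 10 ^ (n + 1))
        = pvF 0 (n + 1) ((r + q * 10 ^ (n + 1)) % 10 ^ (n + 1)) * 10
          + pvC (0 + 2 * (n + 1)) * ((r + q * 10 ^ (n + 1)) / 10 ^ (n + 1)) from rfl]
    rw [e1, e2, ih r hr, e3]
    rw [show pvRev (n + 1) (r / 10 + q * 10 ^ n)
        = pvRev n (r / 10 + q * 10 ^ n) * 10 + (r / 10 + q * 10 ^ n) / 10 ^ n % 10 from rfl]
    rw [pvRev_add n (r / 10) q, e4, Nat.mod_eq_of_lt hq]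
    rw [show pvC (0 + 2 * (n + 1)) = 10 ^ (2 * (n + 1)) + 1 from by simp [pvC]]
    rw [show (10:Nat) ^ (2 * (n + 1)) = (10 ^ (n + 1)) * (10 ^ (n + 1)) from by rw [two_mul, pow_add]]
    rw [show (10:Nat) ^ (n + 1) = 10 ^ n * 10 from by rw [pow_succ]]
    ring


theorem pvA_eq_foldl_step (digit : Int) :
    every_palindrome digit
      = (PySem.List.pyRange (PySem.Int.mod (digit - 1) 2) digit 2).foldl
          (fun ps d => pvStep d ps) [0] := rfl

theorem pv_main_neg (digit : Int) (h : digit < 1) :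
    every_palindrome digit = every_palindrome_alt digit := by
  have hs : 0 ≤ PySem.Int.mod (digit - 1) 2 := by
    show 0 ≤ Int.fmod _ _
    simp [Int.fmod_eq_emod]
    omega
  have hrange : PySem.List.pyRange (PySem.Int.mod (digit - 1) 2) digit 2 = [] := by
    rw [PySem.List.pyRange_of_pos _ _ (by norm_num)]
    rw [if_neg (by omega)]
    simp
  rw [pvA_eq_foldl_step, hrange, every_palindrome_alt, if_pos h]
  rfl

theorem pvAlt_pos (digit : Int) (h : ¬ digit < 1) :
    every_palindrome_alt digit
      = (PySem.List.pyRange 0 (10 ^ ((PySem.Int.floordiv (digit + 1) 2).toNat)) 1).map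
          (pvMirror digit (PySem.Int.floordiv digit 2)) := by
  rw [every_palindrome_alt, if_neg h]

theorem pvMirror_eval (digit : Int) (m j t : Nat)
    (ht : (if PySem.Int.mod digit 2 == 0 then ((j : Nat) : Int) else PySem.Int.floordiv ((j : Nat) : Int) 10)
            = ((t : Nat) : Int)) :
    pvMirror digit ((m : Nat) : Int) ((j : Nat) : Int)
      = ((j * 10 ^ m + pvRev m t : Nat) : Int) := by
  simp only [pvMirror]
  rw [ht]
  have hlen : (PySem.List.pyRange 0 ((m : Nat) : Int) 1).length = m := by
    rw [PySem.List.length_pyRange_one]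
    omega
  rw [pvRev_fold m t _ hlen]
  push_cast
  rw [show ((m : Int)).toNat = m from by omega]

theorem pv_main_odd (n : Nat) :
    every_palindrome ((2 * n + 1 : Nat) : Int) = every_palindrome_alt ((2 * n + 1 : Nat) : Int) := by
  set D : Int := ((2 * n + 1 : Nat) : Int) with hD
  have hDval : D = 2 * (n : Int) + 1 := by rw [hD]; push_cast; ring
  have hs : PySem.Int.mod (D - 1) 2 = 0 := by
    rw [show D - 1 = ((2 * n : Nat) : Int) from by rw [hDval]; push_cast; ring,
        show (2 : Int) = ((2 : Nat) : Int) from rfl, pv_fmod_cast]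
    norm_num [Nat.mul_mod_right]
  have hcount : ((D - 0 + 2 - 1) / 2).toNat = n + 1 := by
    rw [show D - 0 + 2 - 1 = ((2 * n + 2 : Nat) : Int) from by rw [hDval]; push_cast; ring]
    rw [show ((2 * n + 2 : Nat) : Int) / (2 : Int) = (((2 * n + 2) / 2 : Nat) : Int) from by
          push_cast; ring]
    rw [show (2 * n + 2) / 2 = n + 1 from by omega]
    omega
  have hr : PySem.List.pyRange (PySem.Int.mod (D - 1) 2) D 2
      = (List.range (n + 1)).map (fun (k : Nat) => (((0 : Nat) : Int) + 2 * Int.ofNat k)) := by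
    rw [hs, PySem.List.pyRange_of_pos _ _ (by norm_num : (0 : Int) < 2)]
    rw [if_pos (by omega), hcount]
    apply List.map_congr_left
    intro k _
    norm_num
  rw [pvA_eq_foldl_step, hr, pvA_char 0 (n + 1)]
  have hhalf : PySem.Int.floordiv (D + 1) 2 = ((n + 1 : Nat) : Int) := by
    rw [show D + 1 = ((2 * n + 2 : Nat) : Int) from by rw [hDval]; push_cast; ring,
        show (2 : Int) = ((2 : Nat) : Int) from rfl, pv_fdiv_cast]
    norm_num [show (2 * n + 2) / 2 = n + 1 from by omega]
  have hm : PySem.Int.floordiv D 2 = ((n : Nat) : Int) := by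
    rw [hD, show (2 : Int) = ((2 : Nat) : Int) from rfl, pv_fdiv_cast]
    norm_num [show (2 * n + 1) / 2 = n from by omega]
  rw [pvAlt_pos D (by omega), hhalf, hm]
  rw [show (10 : Int) ^ (((n + 1 : Nat) : Int)).toNat = ((10 ^ (n + 1) : Nat) : Int) from by
        rw [show (((n + 1 : Nat) : Int)).toNat = n + 1 from by omega]; push_cast; ring]
  rw [PySem.List.pyRange_zero_nat, List.map_map]
  apply List.map_congr_left
  intro j hj
  have hjlt : j < 10 ^ (n + 1) := List.mem_range.mp hj
  have hodd : PySem.Int.mod D 2 = ((1 : Nat) : Int) := by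
    rw [hD, show (2 : Int) = ((2 : Nat) : Int) from rfl, pv_fmod_cast]
    norm_num [show (2 * n + 1) % 2 = 1 from by omega]
  have ht : (if PySem.Int.mod D 2 == 0 then ((j : Nat) : Int) else PySem.Int.floordiv ((j : Nat) : Int) 10)
      = ((j / 10 : Nat) : Int) := by
    rw [hodd]
    norm_num
  show ((pvF 0 (n + 1) j : Nat) : Int) = pvMirror D ((n : Nat) : Int) ((j : Nat) : Int)
  rw [pvMirror_eval D n j (j / 10) ht, pv_odd_bridge n j hjlt]


theorem pv_main_even (n : Nat) :
    every_palindrome ((2 * n + 2 : Nat) : Int) = every_palindrome_alt ((2 * n + 2 : Nat) : Int) := by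
  set D : Int := ((2 * n + 2 : Nat) : Int) with hD
  have hDval : D = 2 * (n : Int) + 2 := by rw [hD]; push_cast; ring
  have hs : PySem.Int.mod (D - 1) 2 = ((1 : Nat) : Int) := by
    rw [show D - 1 = ((2 * n + 1 : Nat) : Int) from by rw [hDval]; push_cast; ring,
        show (2 : Int) = ((2 : Nat) : Int) from rfl, pv_fmod_cast]
    norm_num [show (2 * n + 1) % 2 = 1 from by omega]
  have hcount : ((D - ((1 : Nat) : Int) + 2 - 1) / 2).toNat = n + 1 := by
    rw [show D - ((1 : Nat) : Int) + 2 - 1 = ((2 * n + 2 : Nat) : Int) from by rw [hDval]; push_cast; ring]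
    rw [show ((2 * n + 2 : Nat) : Int) / (2 : Int) = (((2 * n + 2) / 2 : Nat) : Int) from by
          push_cast; ring]
    rw [show (2 * n + 2) / 2 = n + 1 from by omega]
    omega
  have hr : PySem.List.pyRange (PySem.Int.mod (D - 1) 2) D 2
      = (List.range (n + 1)).map (fun (k : Nat) => (((1 : Nat) : Int) + 2 * Int.ofNat k)) := by
    rw [hs, PySem.List.pyRange_of_pos _ _ (by norm_num : (0 : Int) < 2)]
    rw [if_pos (by omega), hcount]
    apply List.map_congr_left
    intro k _
    norm_num
  rw [pvA_eq_foldl_step, hr, pvA_char 1 (n + 1)]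
  have hhalf : PySem.Int.floordiv (D + 1) 2 = ((n + 1 : Nat) : Int) := by
    rw [show D + 1 = ((2 * n + 3 : Nat) : Int) from by rw [hDval]; push_cast; ring,
        show (2 : Int) = ((2 : Nat) : Int) from rfl, pv_fdiv_cast]
    norm_num [show (2 * n + 3) / 2 = n + 1 from by omega]
  have hm : PySem.Int.floordiv D 2 = ((n + 1 : Nat) : Int) := by
    rw [hD, show (2 : Int) = ((2 : Nat) : Int) from rfl, pv_fdiv_cast]
    norm_num [show (2 * n + 2) / 2 = n + 1 from by omega]
  rw [pvAlt_pos D (by omega), hhalf, hm]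
  rw [show (10 : Int) ^ (((n + 1 : Nat) : Int)).toNat = ((10 ^ (n + 1) : Nat) : Int) from by
        rw [show (((n + 1 : Nat) : Int)).toNat = n + 1 from by omega]; push_cast; ring]
  rw [PySem.List.pyRange_zero_nat, List.map_map]
  apply List.map_congr_left
  intro j hj
  have hjlt : j < 10 ^ (n + 1) := List.mem_range.mp hj
  have heven : PySem.Int.mod D 2 = ((0 : Nat) : Int) := by
    rw [hD, show (2 : Int) = ((2 : Nat) : Int) from rfl, pv_fmod_cast]
    norm_num [show (2 * n + 2) % 2 = 0 from by omega]
  have ht : (if PySem.Int.mod D 2 == 0 then ((j : Nat) : Int) else PySem.Int.floordiv ((j : Nat) : Int) 10)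
      = ((j : Nat) : Int) := by
    rw [heven]
    norm_num
  show ((pvF 1 (n + 1) j : Nat) : Int) = pvMirror D ((n + 1 : Nat) : Int) ((j : Nat) : Int)
  rw [pvMirror_eval D (n + 1) j j ht, pv_even_bridge (n + 1) j hjlt]

-- ===== VERDICT (by name: the statement is the Claim_ definition above) =====
theorem every_palindrome_spec : Claim_equal_every_palindrome := by
  intro digit _
  unfold Spec_every_palindrome
  by_cases h : digit < 1
  · exact pv_main_neg digit h
  · have hd : digit = (digit.toNat : Int) := (Int.toNat_of_nonneg (by omega)).symm
    rcases Nat.even_or_odd digit.toNat with ⟨n, hn⟩ | ⟨n, hn⟩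
    · have hn1 : 1 ≤ n := by omega
      obtain ⟨m, rfl⟩ : ∃ m, n = m + 1 := ⟨n - 1, by omega⟩
      have : digit = ((2 * m + 2 : Nat) : Int) := by push_cast; omega
      rw [this]
      exact pv_main_even m
    · have : digit = ((2 * n + 1 : Nat) : Int) := by push_cast; omega
      rw [this]
      exact pv_main_odd n
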